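-- pv_equiv track=rewrite | github.com/KryvasCZ/uloha | uloha4.py | find_interval_sums
-- ===== SOURCE A (Python) =====
-- def find_interval_sums(sequence):
--     interval_sums = {}
--     n = len(sequence)
--     for i in range(n):
--         interval_sum = 0
--         for j in range(i, n):
--             interval_sum += sequence[j]
--             if j > i:
--                 interval_sums[interval_sum] = interval_sums.get(interval_sum, 0) + 1
--     return interval_sums
-- ===== SOURCE B (Python) =====
-- def find_interval_sums(sequence):
--     n = len(sequence)
--     # prefix sums: P[k] = sum of first k elements
--     P = [0]
--     total = 0
--     for x in sequence:
--         total += x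
--         P.append(total)
--     interval_sums = {}
--     for a in range(n):
--         for b in range(a + 2, n + 1):
--             s = P[b] - P[a]
--             interval_sums[s] = interval_sums.get(s, 0) + 1
--     return interval_sums
-- ===== Notes on version B (the rewrite author's own statement) =====
-- stated objective: alternative
-- what changed: B precomputes a prefix-sum table once and then emits each length>=2 interval sum as a difference P[b]-P[a] over index pairs, replacing A's per-start running-sum accumulation in the inner loop.
import Mathlib
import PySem

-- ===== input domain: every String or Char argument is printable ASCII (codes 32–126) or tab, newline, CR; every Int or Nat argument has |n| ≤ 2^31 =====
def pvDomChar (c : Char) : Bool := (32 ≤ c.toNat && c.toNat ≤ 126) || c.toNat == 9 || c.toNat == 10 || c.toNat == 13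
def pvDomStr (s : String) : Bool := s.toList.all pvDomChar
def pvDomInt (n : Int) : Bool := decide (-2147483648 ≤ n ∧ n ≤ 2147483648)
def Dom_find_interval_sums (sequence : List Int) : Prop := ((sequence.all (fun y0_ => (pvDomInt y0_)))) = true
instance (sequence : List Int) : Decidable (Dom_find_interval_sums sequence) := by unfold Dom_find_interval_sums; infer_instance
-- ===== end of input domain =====

-- B replaces A's per-start running-sum inner loop by a prefix-sum table built once,
-- emitting each length≥2 interval sum as a difference of two prefix sums (alternative decomposition, same cost).

-- ===== PORT A =====
def find_interval_sums (sequence : List Int) : List (Int × Int) :=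
  let n : Int := PySem.List.len sequence
  let d : PySem.Dict Int Int :=
    (PySem.List.pyRange 0 n 1).foldl (fun d i =>
      ((PySem.List.pyRange i n 1).foldl
        (fun (st : Int × PySem.Dict Int Int) j =>
          let s := st.1 + PySem.List.pyGetD sequence j 0
          (s, if j > i then st.2.modify s 0 (· + 1) else st.2))
        (0, d)).2)
      PySem.Dict.empty
  d.items

-- ===== PORT B =====
def find_interval_sums_alt (sequence : List Int) : List (Int × Int) :=
  let n : Int := PySem.List.len sequence
  -- P, total : built exactly as in Source B (running total appended step by step)
  let tp : Int × List Int :=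
    sequence.foldl (fun tp x => (tp.1 + x, tp.2 ++ [tp.1 + x])) ((0 : Int), [(0 : Int)])
  let P : List Int := tp.2
  let d : PySem.Dict Int Int :=
    (PySem.List.pyRange 0 n 1).foldl (fun d a =>
      (PySem.List.pyRange (a + 2) (n + 1) 1).foldl
        (fun d b => d.modify (PySem.List.pyGetD P b 0 - PySem.List.pyGetD P a 0) 0 (· + 1)) d)
      PySem.Dict.empty
  d.items

-- ===== PRECONDITION & SPEC =====
def Spec_find_interval_sums (sequence : List Int) (out : List (Int × Int)) : Prop := out = find_interval_sums_alt sequence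
instance (sequence : List Int) (out : List (Int × Int)) : Decidable (Spec_find_interval_sums sequence out) := by unfold Spec_find_interval_sums; infer_instance

-- ===== CLAIM (what is proved, stated in full; the proofs are below) =====
def Claim_equal_find_interval_sums : Prop := ∀ (sequence : List Int), Dom_find_interval_sums sequence → Spec_find_interval_sums sequence (find_interval_sums sequence)

-- ===== LEMMAS AND PROOFS =====

/-- prefix sum of the first `k` elements -/
def pvS (xs : List Int) (k : Nat) : Int := (xs.take k).sum

lemma pvS_succ (xs : List Int) (k : Nat) (hk : k < xs.length) :
    pvS xs (k + 1) = pvS xs k + xs[k] := by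
  simp only [pvS]
  exact List.sum_take_succ xs k hk

/-- the fold building `(total, P)` in port B, characterised -/
lemma pvP_gen (xs : List Int) (t : Int) (acc : List Int) :
    xs.foldl (fun tp x => (tp.1 + x, tp.2 ++ [tp.1 + x])) (t, acc)
      = (t + xs.sum, acc ++ (List.range xs.length).map (fun k => t + pvS xs (k + 1))) := by
  induction xs generalizing t acc with
  | nil => simp
  | cons y ys ih =>
      simp only [List.foldl_cons, ih, List.length_cons, List.sum_cons,
        List.range_succ_eq_map, List.map_cons, List.map_map]
      simp only [Prod.mk.injEq]
      constructor
      · ring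
      · simp only [List.append_assoc, List.singleton_append]
        congr 1
        congr 1
        · simp [pvS]
        · apply List.map_congr_left
          intro k _
          simp only [Function.comp, pvS, Nat.succ_eq_add_one, List.take_succ_cons,
            List.sum_cons]
          ring

lemma pvP_eq (xs : List Int) :
    (xs.foldl (fun tp x => (tp.1 + x, tp.2 ++ [tp.1 + x])) ((0 : Int), [(0 : Int)])).2
      = (List.range (xs.length + 1)).map (fun k => pvS xs k) := by
  rw [pvP_gen]
  simp only [List.range_succ_eq_map, List.map_cons, List.map_map]
  simp [pvS, Function.comp]

lemma pvP_getD (xs : List Int) (b : Int) (hb0 : 0 ≤ b) (hbn : b ≤ (xs.length : Int)) :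
    PySem.List.pyGetD ((List.range (xs.length + 1)).map (fun k => pvS xs k)) b 0
      = pvS xs b.toNat := by
  rw [PySem.List.pyGetD_eq_getElem _ 0 hb0 (by simp; omega)]
  have hb : b.toNat < xs.length + 1 := by omega
  simp

/-- inner-loop equivalence from position `m` on (A's running sum vs B's prefix differences) -/
lemma pvInner (xs : List Int) (i : Int) (hi : 0 ≤ i) :
    ∀ (fuel : Nat) (m s : Int) (d : PySem.Dict Int Int),
      (((xs.length : Int) - m).toNat ≤ fuel) → i < m →
      s = pvS xs m.toNat - pvS xs i.toNat →
      ((PySem.List.pyRange m (xs.length : Int) 1).foldl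
        (fun (st : Int × PySem.Dict Int Int) j =>
          let s' := st.1 + PySem.List.pyGetD xs j 0
          (s', if j > i then st.2.modify s' 0 (· + 1) else st.2)) (s, d)).2
      = (PySem.List.pyRange (m + 1) ((xs.length : Int) + 1) 1).foldl
          (fun d b => d.modify (pvS xs b.toNat - pvS xs i.toNat) 0 (· + 1)) d := by
  intro fuel
  induction fuel with
  | zero =>
      intro m s d hfuel him hs
      have hnm : (xs.length : Int) ≤ m := by omega
      rw [PySem.List.pyRange_one_eq_nil hnm, PySem.List.pyRange_one_eq_nil (by omega)]
      rfl
  | succ fuel ih =>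
      intro m s d hfuel him hs
      by_cases hmn : m < (xs.length : Int)
      · have hm0 : 0 ≤ m := by omega
        rw [PySem.List.pyRange_one_cons hmn,
          PySem.List.pyRange_one_cons (show m + 1 < (xs.length : Int) + 1 by omega)]
        simp only [List.foldl_cons]
        have hget : PySem.List.pyGetD xs m 0 = xs[m.toNat]'(by omega) :=
          PySem.List.pyGetD_eq_getElem xs 0 hm0 hmn
        have hsucc : (m + 1).toNat = m.toNat + 1 := by omega
        have hs' : s + PySem.List.pyGetD xs m 0
            = pvS xs (m + 1).toNat - pvS xs i.toNat := by
          rw [hget, hs, hsucc, pvS_succ xs m.toNat (by omega)]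
          ring
        rw [if_pos him]
        simp only [hs']
        exact ih (m + 1) _ _ (by omega) (by omega) rfl
      · have hnm : (xs.length : Int) ≤ m := by omega
        rw [PySem.List.pyRange_one_eq_nil hnm, PySem.List.pyRange_one_eq_nil (by omega)]
        rfl

/-- A's whole inner loop for a fixed start `i` equals B's (with prefix sums written via `pvS`) -/
lemma pvInner_full (xs : List Int) (i : Int) (hi0 : 0 ≤ i) (hin : i < (xs.length : Int))
    (d : PySem.Dict Int Int) :
    ((PySem.List.pyRange i (xs.length : Int) 1).foldl
      (fun (st : Int × PySem.Dict Int Int) j =>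
        let s' := st.1 + PySem.List.pyGetD xs j 0
        (s', if j > i then st.2.modify s' 0 (· + 1) else st.2)) (0, d)).2
    = (PySem.List.pyRange (i + 2) ((xs.length : Int) + 1) 1).foldl
        (fun d b => d.modify (pvS xs b.toNat - pvS xs i.toNat) 0 (· + 1)) d := by
  rw [PySem.List.pyRange_one_cons hin]
  simp only [List.foldl_cons, zero_add, if_neg (lt_irrefl i)]
  have hget : PySem.List.pyGetD xs i 0 = xs[i.toNat]'(by omega) :=
    PySem.List.pyGetD_eq_getElem xs 0 hi0 hin
  have hsucc : (i + 1).toNat = i.toNat + 1 := by omega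
  have hs : PySem.List.pyGetD xs i 0 = pvS xs (i + 1).toNat - pvS xs i.toNat := by
    rw [hget, hsucc, pvS_succ xs i.toNat (by omega)]; ring
  rw [hs]
  have h := pvInner xs i hi0 ((xs.length : Int) - (i + 1)).toNat (i + 1)
    (pvS xs (i + 1).toNat - pvS xs i.toNat) d (le_refl _) (by omega) rfl
  rw [show i + 1 + 1 = i + 2 by ring] at h
  exact h

-- ===== VERDICT (by name: the statement is the Claim_ definition above) =====
theorem find_interval_sums_spec : Claim_equal_find_interval_sums := by
  intro sequence _
  unfold Spec_find_interval_sums find_interval_sums find_interval_sums_alt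
  simp only [PySem.List.len_eq]
  congr 1
  rw [pvP_eq]
  apply PySem.List.foldl_congr_mem
  intro d i hmem
  have hi := (PySem.List.mem_pyRange_one.mp hmem)
  rw [pvInner_full sequence i hi.1 hi.2 d]
  apply PySem.List.foldl_congr_mem
  intro d' b hb
  have hbr := (PySem.List.mem_pyRange_one.mp hb)
  have hlen : (PySem.List.len sequence : Int) = (sequence.length : Int) := by simp
  rw [pvP_getD sequence b (by omega) (by omega), pvP_getD sequence i (by omega) (by omega)]
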